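-- pv_equiv track=rewrite | github.com/few-shot-NER-benchmark/BaselineCode | src/evaluation/eval_util.py | batch_span_eval
-- ===== SOURCE A (Python) =====
-- def is_start(curr):
--     return curr[0] == "B" or curr[0] == "U"
--
-- def is_continue(curr):
--     return curr[0] == "I" or curr[0] == "L"
--
-- def is_background(curr):
--     return not is_start(curr) and not is_continue(curr)
--
-- def is_seg_start(curr, prev):
--     return (is_start(curr)
--             or (is_continue(curr)
--                 and (prev is None or is_background(prev) or prev[1:] != curr[1:])))
--
-- def get_spans(sent):
--     """
--     return set of tuples for entities in the form (start_position, end_position, entity_type)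
--     """
--     T = len(sent)
--     spans = set()
--     in_span, span_type = None, None
--     for t in range(T):
--         curr, prev = sent[t], sent[t-1] if t > 0 else None
--         if is_seg_start(curr, prev):
--             if in_span is not None:
--                 spans.add((in_span, t, span_type))
--             in_span, span_type = t, curr[2:]
--         elif not is_continue(curr): # finished something
--             if in_span is not None:
--                 spans.add((in_span, t, span_type))
--             in_span, span_type = None, None
--     # catch stuff at the end
--     if in_span is not None:
--         spans.add((in_span, T, span_type))
--     return spans
--
-- def batch_span_eval(pred, gold):
--     """
--     both preds and gold are bsz x T (but are lists)
--     """
--     bsz = len(pred)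
--     assert len(gold) == bsz, 'Prediction and ground truth with different length'
--     npred, ngold, ncorrect = 0, 0, 0
--     for b in range(bsz):
--         assert len(pred[b]) == len(gold[b])
--         predspans = get_spans(pred[b])
--         goldspans = get_spans(gold[b])
--         npred += len(predspans)
--         ngold += len(goldspans)
--         ncorrect += len(predspans & goldspans)
--     return npred, ngold, ncorrect
-- ===== SOURCE B (Python) =====
-- def _is_start(tag):
--     return tag[0] == "B" or tag[0] == "U"
--
-- def _is_continue(tag):
--     return tag[0] == "I" or tag[0] == "L"
--
-- def _is_background(tag):
--     return not _is_start(tag) and not _is_continue(tag)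
--
-- def _seg_start(sent, t):
--     curr = sent[t]
--     if _is_start(curr):
--         return True
--     if not _is_continue(curr):
--         return False
--     return t == 0 or _is_background(sent[t - 1]) or sent[t - 1][1:] != curr[1:]
--
-- def _spans(sent):
--     T = len(sent)
--     starts = [t for t in range(T) if _seg_start(sent, t)]
--     spans = set()
--     for s in starts:
--         j = s + 1
--         while j < T and not (_seg_start(sent, j) or _is_background(sent[j])):
--             j += 1
--         spans.add((s, j, sent[s][2:]))
--     return spans
--
-- def batch_span_eval(pred, gold):
--     assert len(gold) == len(pred), 'Prediction and ground truth with different length'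
--     npred, ngold, ncorrect = 0, 0, 0
--     for p, g in zip(pred, gold):
--         assert len(p) == len(g)
--         ps, gs = _spans(p), _spans(g)
--         npred += len(ps)
--         ngold += len(gs)
--         ncorrect += len(ps & gs)
--     return npred, ngold, ncorrect
-- ===== Notes on version B (the rewrite author's own statement) =====
-- stated objective: alternative
-- what changed: Replaces A's single-pass state machine carrying (in_span, span_type) through every token by a two-phase decomposition: collect all span-start indices first, then scan each start forward to its closing boundary; the batch loop becomes a zip fold instead of an index loop.
-- outside the precondition, e.g. on batch_span_eval([['B-X']], []): A raises AssertionError, B raises AssertionError; on batch_span_eval([['']], [['']]): A raises IndexError, B raises IndexError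
import Mathlib
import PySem

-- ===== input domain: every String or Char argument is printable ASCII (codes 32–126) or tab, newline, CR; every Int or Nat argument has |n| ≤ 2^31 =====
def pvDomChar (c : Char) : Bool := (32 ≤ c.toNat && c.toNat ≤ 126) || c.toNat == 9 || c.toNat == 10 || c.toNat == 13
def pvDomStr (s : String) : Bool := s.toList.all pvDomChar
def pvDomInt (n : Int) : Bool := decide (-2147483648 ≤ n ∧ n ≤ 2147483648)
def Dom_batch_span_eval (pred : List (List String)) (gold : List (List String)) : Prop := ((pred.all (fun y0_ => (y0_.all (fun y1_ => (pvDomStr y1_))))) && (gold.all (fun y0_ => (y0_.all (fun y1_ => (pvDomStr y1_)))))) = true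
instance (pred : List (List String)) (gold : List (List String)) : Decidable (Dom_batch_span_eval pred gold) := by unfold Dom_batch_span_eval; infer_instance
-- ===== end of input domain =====

-- B replaces A's explicit span state machine by a two-phase decomposition (collect span starts,
-- then scan each start forward to its closing boundary); same cost, alternative structure.

-- ===== PORT A =====
def pvIsStart (curr : String) : Bool :=
  PySem.Str.pyGet? curr 0 == some 'B' || PySem.Str.pyGet? curr 0 == some 'U'

def pvIsContinue (curr : String) : Bool :=
  PySem.Str.pyGet? curr 0 == some 'I' || PySem.Str.pyGet? curr 0 == some 'L'

def pvIsBackground (curr : String) : Bool :=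
  !pvIsStart curr && !pvIsContinue curr

def pvIsSegStart (curr : String) (prev : Option String) : Bool :=
  pvIsStart curr ||
    (pvIsContinue curr &&
      (match prev with
       | none => true
       | some p => pvIsBackground p || (PySem.Str.slice p (some 1) none != PySem.Str.slice curr (some 1) none)))

-- the for-loop of get_spans, state = (spans, in_span/span_type); after the loop the final add
def pvGetSpansLoop (sent : List String) (t : Nat)
    (st : PySem.Set (Int × Int × String) × Option (Int × String)) : PySem.Set (Int × Int × String) :=
  if h : t < sent.length then
    let curr := sent.getD t ""
    let prev : Option String := if t > 0 then some (sent.getD (t - 1) "") else none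
    let st' :=
      if pvIsSegStart curr prev then
        ((match st.2 with
          | some p => PySem.Set.add st.1 (p.1, (t : Int), p.2)
          | none => st.1),
         some ((t : Int), PySem.Str.slice curr (some 2) none))
      else if !pvIsContinue curr then
        ((match st.2 with
          | some p => PySem.Set.add st.1 (p.1, (t : Int), p.2)
          | none => st.1), none)
      else st
    pvGetSpansLoop sent (t + 1) st'
  else
    match st.2 with
    | some p => PySem.Set.add st.1 (p.1, (sent.length : Int), p.2)
    | none => st.1
termination_by sent.length - t

def pvGetSpans (sent : List String) : PySem.Set (Int × Int × String) :=
  pvGetSpansLoop sent 0 (PySem.Set.empty, none)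

-- the for-loop of batch_span_eval over b in range(bsz)
def pvBatchLoop (pred gold : List (List String)) (b : Nat) (acc : Int × Int × Int) : Int × Int × Int :=
  if h : b < pred.length then
    let predspans := pvGetSpans (pred.getD b [])
    let goldspans := pvGetSpans (gold.getD b [])
    pvBatchLoop pred gold (b + 1)
      (acc.1 + PySem.Set.len predspans, acc.2.1 + PySem.Set.len goldspans,
       acc.2.2 + PySem.Set.len (PySem.Set.inter predspans goldspans))
  else acc
termination_by pred.length - b

def batch_span_eval (pred : List (List String)) (gold : List (List String)) : Int × Int × Int :=
  pvBatchLoop pred gold 0 (0, 0, 0)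

-- ===== PORT B =====
-- is the token at position t the start of a span? (Source B's _seg_start)
def pvSegStartAt (sent : List String) (t : Nat) : Bool :=
  let curr := sent.getD t ""
  if pvIsStart curr then true
  else if !pvIsContinue curr then false
  else decide (t = 0) || pvIsBackground (sent.getD (t - 1) "") ||
    (PySem.Str.slice (sent.getD (t - 1) "") (some 1) none != PySem.Str.slice curr (some 1) none)

-- Source B's while loop: first index ≥ j that closes the span (seg start or background), else T
def pvFindEnd (sent : List String) (j : Nat) : Nat :=
  if h : j < sent.length ∧ (pvSegStartAt sent j || pvIsBackground (sent.getD j "")) = false then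
    pvFindEnd sent (j + 1)
  else j
termination_by sent.length - j

def pvSpansAlt (sent : List String) : PySem.Set (Int × Int × String) :=
  ((List.range sent.length).filter (fun t => pvSegStartAt sent t)).foldl
    (fun sp (s : Nat) =>
      PySem.Set.add sp ((s : Int), (pvFindEnd sent (s + 1) : Int), PySem.Str.slice (sent.getD s "") (some 2) none))
    PySem.Set.empty

def batch_span_eval_alt (pred : List (List String)) (gold : List (List String)) : Int × Int × Int :=
  (pred.zip gold).foldl
    (fun acc pg =>
      let ps := pvSpansAlt pg.1
      let gs := pvSpansAlt pg.2
      (acc.1 + PySem.Set.len ps, acc.2.1 + PySem.Set.len gs,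
       acc.2.2 + PySem.Set.len (PySem.Set.inter ps gs)))
    (0, 0, 0)

-- ===== PRECONDITION & SPEC =====
-- Pre_ excludes exactly the inputs on which Python A raises: mismatched outer/inner lengths
-- (AssertionError) and an empty tag string (IndexError in is_start).
def Pre_batch_span_eval (pred : List (List String)) (gold : List (List String)) : Prop :=
  pred.length = gold.length ∧
  (∀ pg ∈ pred.zip gold, pg.1.length = pg.2.length) ∧
  (∀ sent ∈ pred ++ gold, ∀ tag ∈ sent, tag ≠ "")
instance (pred : List (List String)) (gold : List (List String)) : Decidable (Pre_batch_span_eval pred gold) := by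
  unfold Pre_batch_span_eval; infer_instance

def pvWitness_batch_span_eval : List (List String) × List (List String) :=
  ([["B-PER", "I-PER"], ["O"]], [["B-PER", "O"], ["U-X"]])

def Spec_batch_span_eval (pred : List (List String)) (gold : List (List String)) (out : Int × Int × Int) : Prop := out = batch_span_eval_alt pred gold
instance (pred : List (List String)) (gold : List (List String)) (out : Int × Int × Int) : Decidable (Spec_batch_span_eval pred gold out) := by unfold Spec_batch_span_eval; infer_instance

-- ===== CLAIM (what is proved, stated in full; the proofs are below) =====
def Claim_equal_batch_span_eval : Prop := ∀ (pred : List (List String)) (gold : List (List String)), Dom_batch_span_eval pred gold → Pre_batch_span_eval pred gold → Spec_batch_span_eval pred gold (batch_span_eval pred gold)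

-- ===== LEMMAS AND PROOFS =====

-- one unfolding step of A's get_spans loop
theorem pvLoopStep (sent : List String) (t : Nat)
    (st : PySem.Set (Int × Int × String) × Option (Int × String)) (h : t < sent.length) :
    pvGetSpansLoop sent t st =
      pvGetSpansLoop sent (t + 1)
        (if pvIsSegStart (sent.getD t "") (if t > 0 then some (sent.getD (t - 1) "") else none) then
          ((match st.2 with
            | some p => PySem.Set.add st.1 (p.1, (t : Int), p.2)
            | none => st.1),
           some ((t : Int), PySem.Str.slice (sent.getD t "") (some 2) none))
        else if !pvIsContinue (sent.getD t "") then
          ((match st.2 with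
            | some p => PySem.Set.add st.1 (p.1, (t : Int), p.2)
            | none => st.1), none)
        else st) := by
  rw [pvGetSpansLoop, dif_pos h]

theorem pvLoopEnd (sent : List String) (t : Nat)
    (st : PySem.Set (Int × Int × String) × Option (Int × String)) (h : ¬ t < sent.length) :
    pvGetSpansLoop sent t st =
      match st.2 with
      | some p => PySem.Set.add st.1 (p.1, (sent.length : Int), p.2)
      | none => st.1 := by
  rw [pvGetSpansLoop, dif_neg h]

-- A's inline seg-start test equals B's positional one
theorem pvSegStart_eq (sent : List String) (t : Nat) :
    pvIsSegStart (sent.getD t "") (if t > 0 then some (sent.getD (t - 1) "") else none) =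
      pvSegStartAt sent t := by
  rcases Nat.eq_zero_or_pos t with h0 | h0
  · cases h1 : pvIsStart (sent.getD t "") <;>
      cases h2 : pvIsContinue (sent.getD t "") <;>
      simp [pvIsSegStart, pvSegStartAt, h0, h1, h2]
  · have h0' : t ≠ 0 := by omega
    cases h1 : pvIsStart (sent.getD t "") <;>
      cases h2 : pvIsContinue (sent.getD t "") <;>
      simp [pvIsSegStart, pvSegStartAt, h0, h0', h1, h2]

theorem pvFindEnd_stop_len (sent : List String) (j : Nat) (h : ¬ j < sent.length) :
    pvFindEnd sent j = j := by
  rw [pvFindEnd, dif_neg]; intro hcon; exact h hcon.1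

theorem pvFindEnd_stop_bdry (sent : List String) (j : Nat)
    (h : (pvSegStartAt sent j || pvIsBackground (sent.getD j "")) = true) :
    pvFindEnd sent j = j := by
  rw [pvFindEnd, dif_neg]; rintro ⟨-, hf⟩; rw [h] at hf; cases hf

theorem pvFindEnd_step (sent : List String) (j : Nat) (h1 : j < sent.length)
    (h2 : (pvSegStartAt sent j || pvIsBackground (sent.getD j "")) = false) :
    pvFindEnd sent j = pvFindEnd sent (j + 1) := by
  rw [pvFindEnd, dif_pos ⟨h1, h2⟩]

-- stepping a loop that carries an open span (s, ty) equals closing it at pvFindEnd up front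
theorem pvLoop_some_eq (sent : List String) :
    ∀ n t, sent.length - t = n → t ≤ sent.length →
    ∀ (sp : PySem.Set (Int × Int × String)) (s : Int) (ty : String),
      pvGetSpansLoop sent t (sp, some (s, ty)) =
        pvGetSpansLoop sent t (PySem.Set.add sp (s, (pvFindEnd sent t : Int), ty), none) := by
  intro n
  induction n with
  | zero =>
    intro t hn ht sp s ty
    have htl : ¬ t < sent.length := by omega
    have hstop : pvFindEnd sent t = t := pvFindEnd_stop_len sent t htl
    rw [pvLoopEnd sent t _ htl, pvLoopEnd sent t _ htl, hstop]
    have : t = sent.length := by omega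
    rw [this]
  | succ n ih =>
    intro t hn ht sp s ty
    have htl : t < sent.length := by omega
    rw [pvLoopStep sent t _ htl, pvLoopStep sent t _ htl]
    by_cases hs : pvIsSegStart (sent.getD t "") (if t > 0 then some (sent.getD (t - 1) "") else none) = true
    · have hsa : pvSegStartAt sent t = true := by rw [← pvSegStart_eq]; exact hs
      have hstop : pvFindEnd sent t = t := pvFindEnd_stop_bdry sent t (by rw [hsa]; rfl)
      rw [if_pos hs, if_pos hs, hstop]
    · rw [if_neg hs, if_neg hs]
      have hsa : pvSegStartAt sent t = false := by
        rw [← pvSegStart_eq]; exact Bool.eq_false_iff.mpr hs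
      by_cases hc : pvIsContinue (sent.getD t "") = true
      · have hnc : ¬ ((!pvIsContinue (sent.getD t "")) = true) := by rw [hc]; simp
        rw [if_neg hnc, if_neg hnc]
        have hbg : pvIsBackground (sent.getD t "") = false := by
          simp only [pvIsBackground, hc, Bool.not_true, Bool.and_false]
        have hstep : pvFindEnd sent t = pvFindEnd sent (t + 1) :=
          pvFindEnd_step sent t htl (by rw [hsa, hbg]; rfl)
        rw [ih (t + 1) (by omega) (by omega), hstep]
      · have hc' : pvIsContinue (sent.getD t "") = false := Bool.eq_false_iff.mpr hc
        have hnc : (!pvIsContinue (sent.getD t "")) = true := by rw [hc']; rfl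
        rw [if_pos hnc, if_pos hnc]
        have h1 : pvIsStart (sent.getD t "") = false := by
          cases h1 : pvIsStart (sent.getD t "")
          · rfl
          · exact absurd (by simp only [pvIsSegStart, h1, Bool.true_or]) hs
        have hbg : pvIsBackground (sent.getD t "") = true := by
          simp only [pvIsBackground, h1, hc', Bool.not_false, Bool.and_self]
        have hstop : pvFindEnd sent t = t := pvFindEnd_stop_bdry sent t (by rw [hbg]; simp)
        rw [hstop]

-- the closed-state loop from t produces exactly B's span for every start index ≥ t
theorem pvLoop_none_eq (sent : List String) :
    ∀ n t, sent.length - t = n → t ≤ sent.length →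
    ∀ (sp : PySem.Set (Int × Int × String)),
      pvGetSpansLoop sent t (sp, none) =
        ((List.range' t (sent.length - t)).filter (fun u => pvSegStartAt sent u)).foldl
          (fun sp (s : Nat) =>
            PySem.Set.add sp ((s : Int), (pvFindEnd sent (s + 1) : Int),
              PySem.Str.slice (sent.getD s "") (some 2) none))
          sp := by
  intro n
  induction n with
  | zero =>
    intro t hn ht sp
    have htl : ¬ t < sent.length := by omega
    rw [pvLoopEnd sent t _ htl, hn]
    simp
  | succ n ih =>
    intro t hn ht sp
    have htl : t < sent.length := by omega
    have hrange : List.range' t (sent.length - t) = t :: List.range' (t + 1) (sent.length - (t + 1)) := by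
      have h : sent.length - t = (sent.length - (t + 1)) + 1 := by omega
      rw [h, List.range'_succ]
    rw [pvLoopStep sent t _ htl, hrange]
    by_cases hs : pvIsSegStart (sent.getD t "") (if t > 0 then some (sent.getD (t - 1) "") else none) = true
    · have hsa : pvSegStartAt sent t = true := by rw [← pvSegStart_eq]; exact hs
      rw [if_pos hs, List.filter_cons_of_pos hsa, List.foldl_cons,
        pvLoop_some_eq sent (sent.length - (t + 1)) (t + 1) rfl (by omega),
        ih (t + 1) (by omega) (by omega)]
    · have hsa : pvSegStartAt sent t = false := by
        rw [← pvSegStart_eq]; exact Bool.eq_false_iff.mpr hs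
      rw [if_neg hs, List.filter_cons_of_neg (by rw [hsa]; exact Bool.false_ne_true)]
      by_cases hc : pvIsContinue (sent.getD t "") = true
      · have hnc : ¬ ((!pvIsContinue (sent.getD t "")) = true) := by rw [hc]; simp
        rw [if_neg hnc, ih (t + 1) (by omega) (by omega)]
      · have hnc : (!pvIsContinue (sent.getD t "")) = true := by
          rw [Bool.eq_false_iff.mpr hc]; rfl
        rw [if_pos hnc, ih (t + 1) (by omega) (by omega)]

theorem pvGetSpans_eq_alt (sent : List String) : pvGetSpans sent = pvSpansAlt sent := by
  unfold pvGetSpans pvSpansAlt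
  rw [pvLoop_none_eq sent (sent.length - 0) 0 rfl (by omega)]
  simp [List.range_eq_range']

-- A's index loop over range(bsz) equals B's zip fold, given equal outer lengths
theorem pvBatchLoop_eq (pred gold : List (List String)) (hlen : pred.length = gold.length) :
    ∀ n b, pred.length - b = n → ∀ acc,
      pvBatchLoop pred gold b acc =
        ((pred.drop b).zip (gold.drop b)).foldl
          (fun acc pg =>
            let ps := pvSpansAlt pg.1
            let gs := pvSpansAlt pg.2
            (acc.1 + PySem.Set.len ps, acc.2.1 + PySem.Set.len gs,
             acc.2.2 + PySem.Set.len (PySem.Set.inter ps gs)))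
          acc := by
  intro n
  induction n with
  | zero =>
    intro b hn acc
    have hnb : ¬ b < pred.length := by omega
    have hb : pred.length ≤ b := by omega
    rw [pvBatchLoop, dif_neg hnb]
    simp [List.drop_eq_nil_of_le hb, List.drop_eq_nil_of_le (hlen ▸ hb)]
  | succ n ih =>
    intro b hn acc
    have hb : b < pred.length := by omega
    have hbg : b < gold.length := by omega
    rw [pvBatchLoop, dif_pos hb, ih (b + 1) (by omega),
      List.drop_eq_getElem_cons hb, List.drop_eq_getElem_cons hbg, List.zip_cons_cons,
      List.foldl_cons]
    simp only [List.getD_eq_getElem _ _ hb, List.getD_eq_getElem _ _ hbg, pvGetSpans_eq_alt]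

-- ===== VERDICT (by name: the statement is the Claim_ definition above) =====
theorem batch_span_eval_spec : Claim_equal_batch_span_eval := by
  intro pred gold _ hpre
  unfold Spec_batch_span_eval batch_span_eval batch_span_eval_alt
  rw [pvBatchLoop_eq pred gold hpre.1 pred.length 0 rfl]
  simp
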